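-- pv_equiv track=rewrite | github.com/bmuralid/Pure-Fortran | xf2p.py | _find_top_level_double_colon
-- ===== SOURCE A (Python) =====
-- def _find_top_level_double_colon(s: str) -> int:
--     in_str = False
--     quote = ""
--     pdepth = 0
--     bdepth = 0
--     i = 0
--     n = len(s)
--     while i < n - 1:
--         ch = s[i]
--         if in_str:
--             if ch == quote:
--                 in_str = False
--             i += 1
--             continue
--         if ch in ("'", '"'):
--             in_str = True
--             quote = ch
--             i += 1
--             continue
--         if ch == "(":
--             pdepth += 1
--             i += 1
--             continue
--         if ch == ")":
--             pdepth = max(0, pdepth - 1)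
--             i += 1
--             continue
--         if ch == "[":
--             bdepth += 1
--             i += 1
--             continue
--         if ch == "]":
--             bdepth = max(0, bdepth - 1)
--             i += 1
--             continue
--         if pdepth == 0 and bdepth == 0 and s.startswith("::", i):
--             return i
--         i += 1
--     return -1
-- ===== SOURCE B (Python) =====
-- def _step(st, ch):
--     in_str, quote, pd, bd = st
--     if in_str:
--         if ch == quote:
--             in_str = False
--     elif ch in ("'", '"'):
--         in_str, quote = True, ch
--     elif ch == "(":
--         pd += 1
--     elif ch == ")":
--         pd = max(0, pd - 1)
--     elif ch == "[":
--         bd += 1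
--     elif ch == "]":
--         bd = max(0, bd - 1)
--     return (in_str, quote, pd, bd)
--
--
-- def _find_top_level_double_colon(s: str) -> int:
--     # Jump between occurrences of "::" with str.find, advancing the
--     # quote/bracket state only over the skipped segment.
--     st = (False, "", 0, 0)
--     pos = 0
--     while True:
--         j = s.find("::", pos)
--         if j == -1:
--             return -1
--         for k in range(pos, j):
--             st = _step(st, s[k])
--         if not st[0] and st[2] == 0 and st[3] == 0:
--             return j
--         st = _step(st, ":")  # consume the first colon (s[j] == ":")
--         pos = j + 1
-- ===== Notes on version B (the rewrite author's own statement) =====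
-- stated objective: faster
-- what changed: B replaces A's uniform char-by-char index loop by an outer loop over str.find('::') occurrences, folding the quote/paren/bracket state only over each skipped segment with a separate _step transition function; on segments without '::' the work is done by C-level str.find.
import Mathlib
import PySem

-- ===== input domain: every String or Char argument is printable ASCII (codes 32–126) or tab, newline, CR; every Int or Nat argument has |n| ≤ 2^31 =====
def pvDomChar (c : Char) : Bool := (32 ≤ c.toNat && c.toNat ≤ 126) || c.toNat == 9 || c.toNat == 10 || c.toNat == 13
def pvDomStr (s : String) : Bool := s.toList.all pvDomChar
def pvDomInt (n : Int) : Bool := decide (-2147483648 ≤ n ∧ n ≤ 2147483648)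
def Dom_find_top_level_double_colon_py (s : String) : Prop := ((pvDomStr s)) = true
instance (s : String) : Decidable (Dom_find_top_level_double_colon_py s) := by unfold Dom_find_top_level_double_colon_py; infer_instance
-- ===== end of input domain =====

-- B replaces A's char-by-char scan by jumps between str.find("::") occurrences,
-- folding the quote/bracket state only over the skipped segments (alternative decomposition).

-- ===== PORT A =====
-- A's while-loop over indices i < n-1; the remaining suffix of the string is
-- carried explicitly (two leading chars ⇔ i < n-1); Python's quote = "" is
-- modelled as `none`, a one-char quote as `some c` (exact: "" equals no char).
def loopA : List Char → Int → Bool → Option Char → Int → Int → Int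
  | c1 :: c2 :: rest, i, instr, q, pd, bd =>
    if instr then
      loopA (c2 :: rest) (i + 1) (if some c1 == q then false else instr) q pd bd
    else if c1 = '\'' ∨ c1 = '"' then
      loopA (c2 :: rest) (i + 1) true (some c1) pd bd
    else if c1 = '(' then
      loopA (c2 :: rest) (i + 1) instr q (pd + 1) bd
    else if c1 = ')' then
      loopA (c2 :: rest) (i + 1) instr q (max 0 (pd - 1)) bd
    else if c1 = '[' then
      loopA (c2 :: rest) (i + 1) instr q pd (bd + 1)
    else if c1 = ']' then
      loopA (c2 :: rest) (i + 1) instr q pd (max 0 (bd - 1))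
    else if pd = 0 ∧ bd = 0 ∧ c1 = ':' ∧ c2 = ':' then i
    else loopA (c2 :: rest) (i + 1) instr q pd bd
  | _, _, _, _, _, _ => -1

def find_top_level_double_colon_py (s : String) : Int :=
  loopA s.toList 0 false none 0 0

-- ===== PORT B =====
-- state tuple (in_str, quote, pdepth, bdepth) as in Source B
def stepB : Bool × Option Char × Int × Int → Char → Bool × Option Char × Int × Int
  | (instr, q, pd, bd), c =>
    if instr then (if some c == q then false else instr, q, pd, bd)
    else if c = '\'' ∨ c = '"' then (true, some c, pd, bd)
    else if c = '(' then (instr, q, pd + 1, bd)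
    else if c = ')' then (instr, q, max 0 (pd - 1), bd)
    else if c = '[' then (instr, q, pd, bd + 1)
    else if c = ']' then (instr, q, pd, max 0 (bd - 1))
    else (instr, q, pd, bd)

-- s.find("::", pos), relative to the current suffix: first offset of "::", none if absent
def findCC : List Char → Option Nat
  | c1 :: c2 :: rest =>
    if c1 = ':' ∧ c2 = ':' then some 0 else (findCC (c2 :: rest)).map (· + 1)
  | _ => none

-- used by loopB's termination proof (cited by name below)
lemma findCC_le : ∀ (cs : List Char) (d : Nat), findCC cs = some d → d + 2 ≤ cs.length
  | [], _, h => by simp [findCC] at h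
  | [_], _, h => by simp [findCC] at h
  | c1 :: c2 :: rest, d, h => by
    simp only [findCC] at h
    split at h
    · simp only [Option.some_inj] at h
      simp [← h]
    · simp only [Option.map_eq_some_iff] at h
      obtain ⟨d', hd', rfl⟩ := h
      have := findCC_le (c2 :: rest) d' hd'
      simp at this ⊢
      omega

-- Source B's while-True loop; the suffix from `pos` is carried explicitly, so the
-- fold over s[pos:j] is a fold over the first d chars of the suffix.
def loopB (st : Bool × Option Char × Int × Int) (i : Int) (cs : List Char) : Int :=
  match h : findCC cs with
  | none => -1
  | some d =>
    let st' := (cs.take d).foldl stepB st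
    if st'.1 = false ∧ st'.2.2.1 = 0 ∧ st'.2.2.2 = 0 then i + d
    else loopB (stepB st' ':') (i + d + 1) (cs.drop (d + 1))
termination_by cs.length
decreasing_by
  have := findCC_le cs d h
  simp
  omega

def find_top_level_double_colon_py_alt (s : String) : Int :=
  loopB (false, none, 0, 0) 0 s.toList

-- ===== PRECONDITION & SPEC =====
def Spec_find_top_level_double_colon_py (s : String) (out : Int) : Prop := out = find_top_level_double_colon_py_alt s
instance (s : String) (out : Int) : Decidable (Spec_find_top_level_double_colon_py s out) := by unfold Spec_find_top_level_double_colon_py; infer_instance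

-- ===== CLAIM (what is proved, stated in full; the proofs are below) =====
def Claim_equal_find_top_level_double_colon_py : Prop := ∀ (s : String), Dom_find_top_level_double_colon_py s → Spec_find_top_level_double_colon_py s (find_top_level_double_colon_py s)

-- ===== LEMMAS AND PROOFS =====

-- one step of A's loop, for any state and any leading char, is a stepB transition
lemma loopA_cons (c1 c2 : Char) (rest : List Char) (i : Int)
    (st : Bool × Option Char × Int × Int) :
    loopA (c1 :: c2 :: rest) i st.1 st.2.1 st.2.2.1 st.2.2.2 =
      if st.1 = false ∧ st.2.2.1 = 0 ∧ st.2.2.2 = 0 ∧ c1 = ':' ∧ c2 = ':' then i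
      else
        (loopA (c2 :: rest) (i + 1) (stepB st c1).1 (stepB st c1).2.1
          (stepB st c1).2.2.1 (stepB st c1).2.2.2) := by
  obtain ⟨a, q, p, b⟩ := st
  simp only [loopA, stepB]
  split_ifs <;> simp_all

lemma loopA_none (cs : List Char) (i : Int) (st : Bool × Option Char × Int × Int)
    (h : findCC cs = none) :
    loopA cs i st.1 st.2.1 st.2.2.1 st.2.2.2 = -1 := by
  induction cs generalizing i st with
  | nil => obtain ⟨a, q, p, b⟩ := st; simp [loopA]
  | cons c1 rest ih =>
    match rest with
    | [] => obtain ⟨a, q, p, b⟩ := st; simp [loopA]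
    | c2 :: rest' =>
      simp only [findCC] at h
      split at h
      · simp at h
      · simp only [Option.map_eq_none_iff] at h
        rw [loopA_cons]
        rename_i hc
        rw [if_neg (by tauto)]
        exact ih (i + 1) _ h

lemma loopA_some (cs : List Char) (d : Nat) (i : Int)
    (st : Bool × Option Char × Int × Int) (h : findCC cs = some d) :
    loopA cs i st.1 st.2.1 st.2.2.1 st.2.2.2 =
      (let st' := (cs.take d).foldl stepB st
       if st'.1 = false ∧ st'.2.2.1 = 0 ∧ st'.2.2.2 = 0 then i + d
       else loopA (cs.drop (d + 1)) (i + d + 1) (stepB st' ':').1 (stepB st' ':').2.1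
         (stepB st' ':').2.2.1 (stepB st' ':').2.2.2) := by
  induction cs generalizing d i st with
  | nil => simp [findCC] at h
  | cons c1 rest ih =>
    match rest with
    | [] => simp [findCC] at h
    | c2 :: rest' =>
      simp only [findCC] at h
      split at h
      · -- occurrence right here: d = 0, c1 = c2 = ':'
        rename_i hc
        obtain ⟨rfl, rfl⟩ := hc
        have hd : d = 0 := by simpa using h.symm
        subst hd
        simp only [List.take_zero, List.foldl_nil, List.drop_succ_cons, List.drop_zero,
          Nat.cast_zero, add_zero]
        rw [loopA_cons]
        simp
      · rename_i hc
        simp only [Option.map_eq_some_iff] at h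
        obtain ⟨d', hd', rfl⟩ := h
        rw [loopA_cons, if_neg (by tauto), ih d' (i + 1) (stepB st c1) hd']
        simp only [List.take_succ_cons, List.foldl_cons, List.drop_succ_cons]
        have : i + 1 + (d' : Int) = i + ((d' : Int) + 1) := by ring
        have : (i + 1) + ((d' : Int)) + 1 = i + ((d' : Int) + 1) + 1 := by ring
        push_cast
        ring_nf

lemma loopB_eq_loopA (cs : List Char) (st : Bool × Option Char × Int × Int) (i : Int) :
    loopB st i cs = loopA cs i st.1 st.2.1 st.2.2.1 st.2.2.2 := by
  induction hn : cs.length using Nat.strong_induction_on generalizing cs st i with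
  | _ n ih =>
    rw [loopB]
    split
    · exact (loopA_none cs i st (by assumption)).symm
    · rename_i d h
      rw [loopA_some cs d i st h]
      simp only
      split
      · rfl
      · subst hn
        have hlen := findCC_le cs d h
        exact ih (cs.drop (d + 1)).length (by simp; omega) _ _ _ rfl

-- ===== VERDICT (by name: the statement is the Claim_ definition above) =====
theorem find_top_level_double_colon_py_spec : Claim_equal_find_top_level_double_colon_py := by
  intro s _
  unfold Spec_find_top_level_double_colon_py find_top_level_double_colon_py
    find_top_level_double_colon_py_alt
  exact (loopB_eq_loopA s.toList (false, none, 0, 0) 0).symm
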